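-- pv_equiv track=rewrite | github.com/skit-ai/lute | lute/node/search/generic.py | range_replace
-- ===== SOURCE A (Python) =====
-- from typing import Any, Dict, List, Optional, Tuple, Union
--
-- Range = Tuple[int, int]
--
-- def range_replace(text: str, ranges: List[Range], replacements: Optional[Union[List[str], str]] = None) -> str:
--     """
--     Replace the ranges given in text.
--
--     TODO: This is NOT a complete implementation
--           The correct implementation will check if the ranges are overlapping
--           and will throw an error. In case you are using this function, make sure
--           to only work with non-overlapping ranges.
--     """
--
--     if replacements is None:
--         replacements = ""
--
--     if isinstance(replacements, str):
--         replacements = [replacements] * len(ranges)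
--
--     offset = 0
--     for (start, end), rep in zip(sorted(ranges, key=lambda it: it[0]), replacements):
--         text = text[:(start - offset)] + rep + text[(end - offset):]
--         offset += (end - start) - len(rep)
--
--     return text
-- ===== SOURCE B (Python) =====
-- def range_replace(text, ranges, replacements=None):
--     """Stateless formulation: each kept segment is text[prev_end:start], computed
--     from the sorted ranges alone (no running offset, no repeated rebuilding of
--     text); the pieces are produced by one comprehension and joined once."""
--     if replacements is None:
--         replacements = ""
--     if isinstance(replacements, str):
--         replacements = [replacements] * len(ranges)
--     srt = sorted(ranges, key=lambda it: it[0])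
--     used = srt[:min(len(srt), len(replacements))]
--     prevs = [0] + [e for (_, e) in used]
--     pieces = [text[p:s] + rep for p, (s, _), rep in zip(prevs, used, replacements)]
--     tail = text[used[-1][1]:] if used else text
--     return "".join(pieces) + tail
-- ===== Notes on version B (the rewrite author's own statement) =====
-- stated objective: alternative
-- what changed: A rebuilds the whole text once per range while tracking a shrink/grow offset; B computes each kept segment statelessly as text[prev_end:start] straight from the sorted ranges (zip of the shifted end list), builds all pieces in one comprehension and joins once (not credited as faster in a timing run: its large random inputs fall outside Pre_).
-- outside the precondition, e.g. on range_replace('hello', [(0, 2), (1, 4)], ['X', 'Y']): A returns 'Yo', B returns 'XYo'; on range_replace('abcdef', [(-2, 3), (4, 5)], ['X', 'Y']): A returns 'YbcdXdef', B returns 'abcdXdYf'; on range_replace('ab', [(5, 1), (1, 2)], ['X', 'Y']): A returns 'aXYX', B returns 'aXYb'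
import Mathlib
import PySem

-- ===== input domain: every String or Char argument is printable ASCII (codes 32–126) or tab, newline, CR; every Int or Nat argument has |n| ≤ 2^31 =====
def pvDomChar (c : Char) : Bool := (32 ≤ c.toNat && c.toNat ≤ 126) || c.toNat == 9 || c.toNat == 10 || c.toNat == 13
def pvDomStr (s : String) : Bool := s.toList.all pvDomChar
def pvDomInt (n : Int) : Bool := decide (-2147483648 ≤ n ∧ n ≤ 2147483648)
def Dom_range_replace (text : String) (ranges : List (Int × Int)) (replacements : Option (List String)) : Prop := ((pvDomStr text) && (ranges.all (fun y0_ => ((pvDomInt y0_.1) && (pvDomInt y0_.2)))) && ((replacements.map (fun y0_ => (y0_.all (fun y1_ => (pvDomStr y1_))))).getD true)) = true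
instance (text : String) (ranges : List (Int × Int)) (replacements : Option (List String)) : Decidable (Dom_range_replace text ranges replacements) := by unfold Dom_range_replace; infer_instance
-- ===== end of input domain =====

-- B replaces A's stateful loop (one rebuild of the whole text per range, with a running
-- offset) by a stateless formulation: each kept segment is text[prev_end:start], read off
-- the sorted ranges zipped with their shifted end list, all pieces joined once.

-- replacements is None -> "" -> [""] * len(ranges); a provided list is used as is
def pvReps (ranges : List (Int × Int)) (replacements : Option (List String)) : List String :=
  match replacements with
  | none => List.replicate ranges.length ""
  | some rs => rs

-- ===== PORT A =====
-- one iteration of A's loop: text = text[:(start-offset)] + rep + text[(end-offset):];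
-- offset += (end - start) - len(rep)
def pvAStep (st : List Char × Int) (item : (Int × Int) × String) : List Char × Int :=
  (PySem.List.slice st.1 none (some (item.1.1 - st.2)) ++ item.2.toList ++
     PySem.List.slice st.1 (some (item.1.2 - st.2)) none,
   st.2 + (item.1.2 - item.1.1) - (item.2.toList.length : Int))

def range_replace (text : String) (ranges : List (Int × Int)) (replacements : Option (List String)) : String :=
  String.ofList
    (((PySem.List.sorted ranges (fun it => it.1) false).zip (pvReps ranges replacements)).foldl
        pvAStep (text.toList, 0)).1

-- ===== PORT B =====
-- srt = sorted(ranges, key=...); used = srt[:min(len(srt), len(replacements))];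
-- prevs = [0] + [e for (_, e) in used];
-- pieces = [text[p:s] + rep for p, (s, _), rep in zip(prevs, used, replacements)];
-- tail = text[used[-1][1]:] if used else text; return "".join(pieces) + tail
def range_replace_alt (text : String) (ranges : List (Int × Int)) (replacements : Option (List String)) : String :=
  let reps := match replacements with
    | none => List.replicate ranges.length ""
    | some rs => rs
  let srt := PySem.List.sorted ranges (fun it => it.1) false
  let used := srt.take (min srt.length reps.length)
  let prevs := (0 : Int) :: used.map (fun p => p.2)
  let pieces := (prevs.zip (used.zip reps)).map
      (fun q => PySem.List.slice text.toList (some q.1) (some q.2.1.1) ++ q.2.2.toList)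
  let tail := match used.getLast? with
    | none => text.toList
    | some p => PySem.List.slice text.toList (some p.2) none
  String.ofList (pieces.flatten ++ tail)

-- ===== PRECONDITION & SPEC =====
-- the ranges that actually enter the loop (zip truncates to the replacements' length)
def pvUsed (ranges : List (Int × Int)) (replacements : Option (List String)) : List (Int × Int) :=
  (PySem.List.sorted ranges (fun it => it.1) false).take (pvReps ranges replacements).length

-- With at most one used range any bounds are admitted, as is an empty text with
-- all-empty used replacements. Otherwise Pre_ excludes negative bounds,
-- overlapping/backward-stepping ranges and a range that starts past the end of the
-- text yet ends inside it: A's own docstring requires non-overlapping ranges, and on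
-- such inputs A's offset bookkeeping yields accidental values (see cites in claim.json).
def Pre_range_replace (text : String) (ranges : List (Int × Int)) (replacements : Option (List String)) : Prop :=
  (pvUsed ranges replacements).length ≤ 1 ∨
  (text.toList = [] ∧ ∀ r ∈ (pvReps ranges replacements).take ranges.length, r.toList = []) ∨
  ((∀ p ∈ pvUsed ranges replacements, 0 ≤ p.1 ∧ 0 ≤ p.2 ∧
      (p.1 ≤ (text.toList.length : Int) ∨ (text.toList.length : Int) ≤ p.2)) ∧
   (∀ q ∈ (pvUsed ranges replacements).zip (pvUsed ranges replacements).tail,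
      q.1.2 ≤ q.2.1 ∧ q.1.2 ≤ q.2.2))

instance (text : String) (ranges : List (Int × Int)) (replacements : Option (List String)) : Decidable (Pre_range_replace text ranges replacements) := by
  unfold Pre_range_replace; infer_instance

def pvWitness_range_replace : String × (List (Int × Int)) × Option (List String) :=
  ("hello world", [(6, 11), (0, 5)], some ["there", "hi"])

def Spec_range_replace (text : String) (ranges : List (Int × Int)) (replacements : Option (List String)) (out : String) : Prop := out = range_replace_alt text ranges replacements
instance (text : String) (ranges : List (Int × Int)) (replacements : Option (List String)) (out : String) : Decidable (Spec_range_replace text ranges replacements out) := by unfold Spec_range_replace; infer_instance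

-- ===== CLAIM (what is proved, stated in full; the proofs are below) =====
def Claim_equal_range_replace : Prop := ∀ (text : String) (ranges : List (Int × Int)) (replacements : Option (List String)), Dom_range_replace text ranges replacements → Pre_range_replace text ranges replacements → Spec_range_replace text ranges replacements (range_replace text ranges replacements)

-- ===== LEMMAS AND PROOFS =====

-- recursive reference form both ports are reduced to: from cursor c, the pairs
-- (range, replacement) in order, then the rest of the text from the last end
def pvGo (t : List Char) : Int → List (Int × Int) → List String → List Char
  | c, [], _ => PySem.List.slice t (some c) none
  | c, _ :: _, [] => PySem.List.slice t (some c) none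
  | c, (s, e) :: rs, r :: reps =>
      PySem.List.slice t (some c) (some s) ++ r.toList ++ pvGo t e rs reps

-- the cursor after processing all used pairs
def pvEnd : Int → List (Int × Int) → List String → Int
  | c, [], _ => c
  | c, _ :: _, [] => c
  | _, (_, e) :: rs, _ :: reps => pvEnd e rs reps

lemma pv_zip_eq_zip_take {α β : Type} (l : List α) (r : List β) :
    l.zip r = (l.take r.length).zip r := by
  induction l generalizing r with
  | nil => simp
  | cons a l ih =>
    cases r with
    | nil => simp
    | cons b r => simpa [List.zip_cons_cons] using ih r

-- membership transfer for the adjacent-pairs condition along map Prod.fst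
lemma pv_adj_of_adj_map {α β : Type} (f : α → β) (S : β → β → Prop) (l : List α)
    (h : ∀ q ∈ (l.map f).zip (l.map f).tail, S q.1 q.2) :
    ∀ q ∈ l.zip l.tail, S (f q.1) (f q.2) := by
  intro q hq
  apply h (f q.1, f q.2)
  rw [← List.map_tail, List.zip_map]
  exact List.mem_map_of_mem hq

lemma pv_snd_mem_take {α β : Type} (l : List α) (r : List β) (p : α × β)
    (hp : p ∈ l.zip r) : p.2 ∈ r.take l.length := by
  induction l generalizing r with
  | nil => simp at hp
  | cons a l ih =>
    cases r with
    | nil => simp at hp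
    | cons b r =>
      simp only [List.zip_cons_cons, List.mem_cons] at hp
      rcases hp with rfl | hp
      · simp
      · simp only [List.length_cons, List.take_succ_cons, List.mem_cons]
        exact Or.inr (ih r hp)

-- B's pieces-and-tail expression equals the reference recursion (no side conditions)
lemma pv_pieces_eq_go (t : List Char) (rs : List (Int × Int)) :
    ∀ (reps : List String) (c : Int),
    ((((c :: (rs.take (min rs.length reps.length)).map (fun p => p.2)).zip
          ((rs.take (min rs.length reps.length)).zip reps)).map
        (fun q => PySem.List.slice t (some q.1) (some q.2.1.1) ++ q.2.2.toList)).flatten)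
      ++ PySem.List.slice t (some (pvEnd c rs reps)) none
    = pvGo t c rs reps := by
  induction rs with
  | nil => intro reps c; simp [pvGo, pvEnd]
  | cons p rs ih =>
    rcases p with ⟨s, e⟩
    intro reps c
    cases reps with
    | nil => simp [pvGo, pvEnd]
    | cons r reps =>
      have hmin : min ((s, e) :: rs).length (r :: reps).length
          = min rs.length reps.length + 1 := by
        simp [Nat.succ_min_succ]
      rw [hmin]
      simp only [List.take_succ_cons, List.map_cons, List.zip_cons_cons, List.flatten_cons,
        pvGo, pvEnd, List.append_assoc]
      rw [← ih reps e]

-- the tail cursor B reads from used[-1] is the reference recursion's final cursor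
lemma pv_end_spec (rs : List (Int × Int)) :
    ∀ (reps : List String) (c : Int),
    pvEnd c rs reps
      = (((rs.take (min rs.length reps.length)).getLast?).map (fun p => p.2)).getD c := by
  induction rs with
  | nil => intro reps c; simp [pvEnd]
  | cons p rs ih =>
    rcases p with ⟨s, e⟩
    intro reps c
    cases reps with
    | nil => simp [pvEnd]
    | cons r reps =>
      have hmin : min ((s, e) :: rs).length (r :: reps).length
          = min rs.length reps.length + 1 := by
        simp [Nat.succ_min_succ]
      rw [hmin]
      simp only [List.take_succ_cons, pvEnd]
      rw [ih reps e]
      cases h : rs.take (min rs.length reps.length) with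
      | nil => simp
      | cons q qs =>
        obtain ⟨p, hp⟩ := Option.isSome_iff_exists.mp
          (show (q :: qs).getLast?.isSome by simp [List.getLast?_isSome])
        simp [hp, List.getLast?_cons_cons]

-- port B computes the reference recursion from cursor 0 over the zip-truncated pairs
lemma pv_alt_eq_go (text : String) (ranges : List (Int × Int)) (replacements : Option (List String)) :
    range_replace_alt text ranges replacements
      = String.ofList (pvGo text.toList 0
          (PySem.List.sorted ranges (fun it => it.1) false) (pvReps ranges replacements)) := by
  unfold range_replace_alt
  have hreps : (match replacements with
      | none => List.replicate ranges.length ""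
      | some rs => rs) = pvReps ranges replacements := by
    cases replacements <;> rfl
  rw [hreps]
  set srt := PySem.List.sorted ranges (fun it => it.1) false with hsrt
  set reps := pvReps ranges replacements with hr
  have htail : (match (srt.take (min srt.length reps.length)).getLast? with
      | none => text.toList
      | some p => PySem.List.slice text.toList (some p.2) none)
      = PySem.List.slice text.toList (some (pvEnd 0 srt reps)) none := by
    rw [pv_end_spec srt reps 0]
    cases h : (srt.take (min srt.length reps.length)).getLast? with
    | none => simp [PySem.List.slice_from _ (le_refl (0:Int))]
    | some p => simp
  simp only [htail]
  rw [pv_pieces_eq_go text.toList srt reps 0]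

lemma pv_empty_loopA (ps : List ((Int × Int) × String)) (hreps : ∀ p ∈ ps, p.2.toList = []) :
    ∀ off : Int, (ps.foldl pvAStep ([], off)).1 = [] := by
  induction ps with
  | nil => intro off; rfl
  | cons p rest ih =>
    intro off
    have hp : p.2.toList = [] := hreps p List.mem_cons_self
    have hstep : pvAStep ([], off) p = ([], off + (p.1.2 - p.1.1) - (p.2.toList.length : Int)) := by
      simp [pvAStep, PySem.List.slice, hp]
    rw [List.foldl_cons, hstep]
    exact ih (fun q hq => hreps q (List.mem_cons_of_mem _ hq)) _

lemma pv_empty_go (rs : List (Int × Int)) :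
    ∀ (reps : List String) (c : Int), (∀ p ∈ rs.zip reps, p.2.toList = []) →
    pvGo [] c rs reps = [] := by
  induction rs with
  | nil => intro reps c _; simp [pvGo, PySem.List.slice]
  | cons p rs ih =>
    rcases p with ⟨s, e⟩
    intro reps c hreps
    cases reps with
    | nil => simp [pvGo, PySem.List.slice]
    | cons r reps =>
      have hr : r.toList = [] := hreps ((s, e), r) (by simp [List.zip_cons_cons])
      simp only [pvGo, hr]
      rw [ih reps e (fun q hq => hreps q (by simp [List.zip_cons_cons, hq]))]
      simp [PySem.List.slice]

lemma pv_mem_zip_tail_cons {α : Type} (a : α) (l : List α) (q : α × α)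
    (hq : q ∈ l.zip l.tail) : q ∈ (a :: l).zip (a :: l).tail := by
  cases l with
  | nil => simp at hq
  | cons x xs =>
    simp only [List.tail_cons, List.zip_cons_cons] at hq ⊢
    exact List.mem_cons_of_mem _ hq

-- the loop invariant: A's running text is (segments already emitted) ++ (rest of the
-- original text from the reference cursor), and A's offset never exceeds
-- cursor - built.length, with equality while the cursor is inside the text.
lemma pv_loop_eq (t : List Char) (rs : List (Int × Int)) :
    ∀ (reps : List String) (built : List Char) (c off : Int), 0 ≤ c →
    off ≤ c - built.length →
    ((off = c - built.length ∧ c ≤ (t.length : Int)) ∨ (t.length : Int) ≤ c) →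
    (∀ p ∈ rs.zip reps, 0 ≤ p.1.1 ∧ 0 ≤ p.1.2 ∧ (p.1.1 ≤ (t.length : Int) ∨ (t.length : Int) ≤ p.1.2)) →
    (∀ q ∈ (rs.zip reps).zip (rs.zip reps).tail, q.1.1.2 ≤ q.2.1.1 ∧ q.1.1.2 ≤ q.2.1.2) →
    (∀ p ∈ (rs.zip reps).head?, c ≤ p.1.1 ∧ c ≤ p.1.2) →
    ((rs.zip reps).foldl pvAStep (built ++ t.drop c.toNat, off)).1
      = built ++ pvGo t c rs reps := by
  induction rs with
  | nil =>
    intro reps built c off hc _ _ _ _ _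
    simp [pvGo, PySem.List.slice_from _ hc]
  | cons p rs ih =>
    rcases p with ⟨s, e⟩
    intro reps built c off hc hoff hreg hall hadj hhead
    cases reps with
    | nil =>
      simp [pvGo, PySem.List.slice_from _ hc]
    | cons rep reps =>
      simp only [List.zip_cons_cons] at hall hadj hhead ⊢
      have hse : 0 ≤ s ∧ 0 ≤ e ∧ (s ≤ (t.length : Int) ∨ (t.length : Int) ≤ e) :=
        hall _ List.mem_cons_self
      have hcse : c ≤ s ∧ c ≤ e := hhead ((s, e), rep) rfl
      have hcs : c ≤ s := hcse.1
      have hce : c ≤ e := hcse.2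
      have h0s : (0:Int) ≤ s := hse.1
      have h0e : (0:Int) ≤ e := hse.2.1
      -- the kept segment of this step
      have hseg : PySem.List.slice t (some c) (some s) = (t.drop c.toNat).take (s.toNat - c.toNat) :=
        PySem.List.slice_toNat t hc h0s
      have hseglen : ((PySem.List.slice t (some c) (some s)).length : Int) ≤ s - c := by
        rw [hseg]; simp only [List.length_take, List.length_drop]; omega
      -- A's prefix slice = segments so far ++ the kept segment
      have hpre : PySem.List.slice (built ++ t.drop c.toNat) none (some (s - off))
          = built ++ PySem.List.slice t (some c) (some s) := by
        rw [PySem.List.slice_to _ (by omega : (0:Int) ≤ s - off), hseg]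
        rcases hreg with ⟨hreg, hcl⟩ | hreg
        · have h2 : (s - off).toNat = built.length + (s.toNat - c.toNat) := by omega
          rw [h2, List.take_length_add_append]
        · have hd : t.drop c.toNat = [] := List.drop_eq_nil_of_le (by omega)
          rw [hd]
          simp only [List.take_nil, List.append_nil]
          exact List.take_of_length_le (by omega)
      -- A's suffix slice = the original text from the new cursor
      have hsuf : PySem.List.slice (built ++ t.drop c.toNat) (some (e - off)) none
          = t.drop e.toNat := by
        rw [PySem.List.slice_from _ (by omega : (0:Int) ≤ e - off)]
        rcases hreg with ⟨hreg, hcl⟩ | hreg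
        · have h2 : (e - off).toNat = built.length + (e.toNat - c.toNat) := by omega
          rw [h2, List.drop_length_add_append, List.drop_drop]
          have h3 : c.toNat + (e.toNat - c.toNat) = e.toNat := by omega
          rw [h3]
        · have hd : t.drop c.toNat = [] := List.drop_eq_nil_of_le (by omega)
          rw [hd, List.append_nil, List.drop_eq_nil_of_le (by omega),
            List.drop_eq_nil_of_le (by omega)]
      have hstep : pvAStep (built ++ t.drop c.toNat, off) ((s, e), rep)
          = ((built ++ PySem.List.slice t (some c) (some s) ++ rep.toList) ++ t.drop e.toNat,
             off + (e - s) - (rep.toList.length : Int)) := by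
        simp only [pvAStep, hpre, hsuf]
      rw [List.foldl_cons, hstep]
      have hrec := ih reps (built ++ PySem.List.slice t (some c) (some s) ++ rep.toList) e
          (off + (e - s) - (rep.toList.length : Int)) h0e
          (by simp only [List.length_append]; push_cast; omega)
          (by
            rcases hreg with ⟨hreg, hcl⟩ | hreg
            · by_cases hel : (t.length : Int) ≤ e
              · exact Or.inr hel
              · left
                have hsl : s ≤ (t.length : Int) := by omega
                have hex : ((PySem.List.slice t (some c) (some s)).length : Int) = s - c := by
                  rw [hseg]; simp only [List.length_take, List.length_drop]; omega
                constructor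
                · simp only [List.length_append]
                  push_cast
                  omega
                · omega
            · exact Or.inr (le_trans hreg hce))
          (fun q hq => hall q (List.mem_cons_of_mem _ hq))
          (by
            intro q hq
            apply hadj
            exact pv_mem_zip_tail_cons _ _ _ hq)
          (by
            intro q hq
            cases hz : rs.zip reps with
            | nil => rw [hz] at hq; simp at hq
            | cons x xs =>
              rw [hz] at hq
              have hqr : x = q := by simpa using hq
              cases hqr
              exact hadj (((s, e), rep), q) (by rw [hz]; simp [List.zip_cons_cons]))
      rw [hrec]
      simp [pvGo, List.append_assoc]

lemma pv_used_spec (ranges : List (Int × Int)) (replacements : Option (List String)) :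
    ((PySem.List.sorted ranges (fun it => it.1) false).zip (pvReps ranges replacements)).map
        Prod.fst = pvUsed ranges replacements := by
  rw [pv_zip_eq_zip_take, List.map_fst_zip]
  · rfl
  · simp only [List.length_take]
    omega

-- ===== VERDICT (by name: the statement is the Claim_ definition above) =====
theorem range_replace_spec : Claim_equal_range_replace := by
  intro text ranges replacements _ hpre
  unfold Spec_range_replace
  rw [pv_alt_eq_go]
  unfold range_replace
  set srt := PySem.List.sorted ranges (fun it => it.1) false with hsrt
  set reps := pvReps ranges replacements with hr
  have hmap : (srt.zip reps).map Prod.fst = pvUsed ranges replacements := pv_used_spec ranges replacements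
  rcases hpre with hone | ⟨htext, hempty⟩ | ⟨hbound, hchain⟩
  · -- at most one pair enters the loop: A's single rebuild is the three reference segments
    have hlen : (srt.zip reps).length ≤ 1 := by
      have hl := congrArg List.length hmap
      simp only [List.length_map] at hl
      omega
    cases hs : srt with
    | nil => simp [pvGo]
    | cons p srt' =>
      cases hrp : reps with
      | nil => simp [pvGo]
      | cons r reps' =>
        rcases p with ⟨s, e⟩
        have hz1 : (srt'.zip reps').length = 0 := by
          rw [hs, hrp] at hlen
          simp only [List.zip_cons_cons, List.length_cons] at hlen
          omega
        have hz : srt'.zip reps' = [] := List.eq_nil_of_length_eq_zero hz1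
        have hgo : pvGo text.toList e srt' reps' = PySem.List.slice text.toList (some e) none := by
          cases srt' with
          | nil => rfl
          | cons q qs =>
            cases reps' with
            | nil => rfl
            | cons w ws => simp [List.zip_cons_cons] at hz
        simp only [List.zip_cons_cons, List.foldl_cons, List.foldl_nil, hz, pvAStep, pvGo, hgo]
        simp [sub_zero, List.append_assoc]
  · -- empty text, all used replacements empty: both sides return ""
    have hreps : ∀ p ∈ srt.zip reps, p.2.toList = [] := by
      intro p hp
      apply hempty
      have := pv_snd_mem_take _ _ p hp
      rw [hsrt] at this
      rwa [PySem.List.length_sorted] at this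
    rw [htext]
    have ha := pv_empty_loopA (srt.zip reps) hreps 0
    have hb := pv_empty_go srt reps 0 hreps
    rw [ha, hb]
  · -- main case: sorted, non-overlapping, in-bounds ranges
    have hall : ∀ p ∈ srt.zip reps,
        0 ≤ p.1.1 ∧ 0 ≤ p.1.2 ∧ (p.1.1 ≤ (text.toList.length : Int) ∨ (text.toList.length : Int) ≤ p.1.2) := by
      intro p hp
      exact hbound p.1 (hmap ▸ List.mem_map_of_mem hp)
    have hadj := pv_adj_of_adj_map (Prod.fst (β := String))
        (fun (a b : Int × Int) => a.2 ≤ b.1 ∧ a.2 ≤ b.2) _ (hmap ▸ hchain)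
    have hhead : ∀ p ∈ (srt.zip reps).head?, (0:Int) ≤ p.1.1 ∧ (0:Int) ≤ p.1.2 := by
      intro p hp
      have h := hall p (List.mem_of_mem_head? hp)
      exact ⟨h.1, h.2.1⟩
    have hmain := pv_loop_eq text.toList srt reps [] 0 0 le_rfl (by simp) (by simp) hall hadj hhead
    simp only [List.drop_zero, List.nil_append, Int.toNat_zero] at hmain
    rw [hmain]
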